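-- pv_equiv track=rewrite | github.com/pokerSeven/Effective_Python | 3/3_23.py | increment_with_report
-- ===== SOURCE A (Python) =====
-- from collections import defaultdict
--
-- def increment_with_report(current,increments):
--     added_count = [0]
--
--     def missing():
--         added_count[0] += 1
--         return  0
--     result = defaultdict(missing,current)
--     for key,amount in increments:
--         result[key] += amount
--
--     return result, added_count[0]
-- ===== SOURCE B (Python) =====
-- def increment_with_report(current, increments):
--     totals = {}
--     for key, amount in increments:
--         totals[key] = totals.get(key, 0) + amount
--     result = dict(current)
--     added = sum(1 for key in totals if key not in result)
--     for key, total in totals.items():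
--         result[key] = result.get(key, 0) + total
--     return result, added
-- ===== Notes on version B (the rewrite author's own statement) =====
-- stated objective: alternative
-- what changed: Replaces A's single pass with a defaultdict whose __missing__ callback counts new keys by a staged two-pass algorithm: first aggregate increments into per-key totals, then count the aggregated keys absent from current and merge the totals into dict(current) in a second loop.
import Mathlib
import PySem

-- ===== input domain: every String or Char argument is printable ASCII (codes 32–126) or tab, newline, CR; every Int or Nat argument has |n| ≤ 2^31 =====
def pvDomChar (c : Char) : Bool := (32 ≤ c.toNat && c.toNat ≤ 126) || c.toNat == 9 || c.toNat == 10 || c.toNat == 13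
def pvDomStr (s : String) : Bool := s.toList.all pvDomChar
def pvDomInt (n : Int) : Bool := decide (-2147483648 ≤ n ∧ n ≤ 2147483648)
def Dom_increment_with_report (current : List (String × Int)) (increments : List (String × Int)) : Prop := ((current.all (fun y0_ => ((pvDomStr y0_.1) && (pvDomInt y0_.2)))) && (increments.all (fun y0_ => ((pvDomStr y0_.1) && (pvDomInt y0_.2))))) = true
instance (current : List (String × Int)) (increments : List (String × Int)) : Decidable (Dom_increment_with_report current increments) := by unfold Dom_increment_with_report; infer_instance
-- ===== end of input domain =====

-- B replaces A's one-pass defaultdict-__missing__ counting by a staged two-pass algorithm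
-- (aggregate increments into totals, count new keys, then merge); objective: alternative.

-- ===== PORT A =====
-- result[key] += amount on the defaultdict: the lookup calls missing() (counter += 1, value 0) when the key is absent
def pvStepA (st : PySem.Dict String Int × Int) (p : String × Int) : PySem.Dict String Int × Int :=
  match st.1.get? p.1 with
  | some v => (st.1.insert p.1 (v + p.2), st.2)
  | none   => (st.1.insert p.1 (0 + p.2), st.2 + 1)

def increment_with_report (current : List (String × Int)) (increments : List (String × Int)) : (List (String × Int)) × Int :=
  let result := PySem.Dict.ofList current
  let r := increments.foldl pvStepA (result, 0)
  (r.1.items, r.2)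

-- ===== PORT B =====
-- totals[key] = totals.get(key, 0) + amount / result[key] = result.get(key, 0) + total
def pvMerge (d : PySem.Dict String Int) (l : List (String × Int)) : PySem.Dict String Int :=
  l.foldl (fun t p => t.insert p.1 (t.getD p.1 0 + p.2)) d

def increment_with_report_alt (current : List (String × Int)) (increments : List (String × Int)) : (List (String × Int)) × Int :=
  let totals := pvMerge PySem.Dict.empty increments
  let result := PySem.Dict.ofList current
  let added : Int := (totals.keys.filter (fun k => !(result.contains k))).length
  let final := pvMerge result totals.items
  (final.items, added)

-- ===== PRECONDITION & SPEC =====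
def Spec_increment_with_report (current : List (String × Int)) (increments : List (String × Int)) (out : (List (String × Int)) × Int) : Prop := out = increment_with_report_alt current increments
instance (current : List (String × Int)) (increments : List (String × Int)) (out : (List (String × Int)) × Int) : Decidable (Spec_increment_with_report current increments out) := by unfold Spec_increment_with_report; infer_instance

-- ===== CLAIM (what is proved, stated in full; the proofs are below) =====
def Claim_equal_increment_with_report : Prop := ∀ (current : List (String × Int)) (increments : List (String × Int)), Dom_increment_with_report current increments → Spec_increment_with_report current increments (increment_with_report current increments)

-- ===== LEMMAS AND PROOFS =====

-- A's step, written as an unconditional insert plus a conditional bump of the counter.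
theorem pvStepA_eq (st : PySem.Dict String Int × Int) (p : String × Int) :
    pvStepA st p = (st.1.insert p.1 (st.1.getD p.1 0 + p.2),
                    st.2 + if st.1.contains p.1 then 0 else 1) := by
  obtain ⟨d, c⟩ := st
  cases h : d.get? p.1 with
  | none => simp [pvStepA, h, PySem.Dict.getD_eq_get?_getD, PySem.Dict.contains_eq_isSome_get?]
  | some v => simp [pvStepA, h, PySem.Dict.getD_eq_get?_getD, PySem.Dict.contains_eq_isSome_get?]

-- First component of A's loop is exactly the merge fold.
theorem pv_fst_foldl (l : List (String × Int)) (d : PySem.Dict String Int) (c : Int) :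
    (l.foldl pvStepA (d, c)).1 = pvMerge d l := by
  induction l generalizing d c with
  | nil => rfl
  | cons p t ih =>
    rw [List.foldl_cons, pvStepA_eq]
    simpa [pvMerge] using ih _ _

-- Counter of A's loop = growth of the key set.
theorem pv_snd_foldl (l : List (String × Int)) :
    ∀ (d : PySem.Dict String Int) (c : Int),
    (l.foldl pvStepA (d, c)).2 = c + ((PySem.Set.update d.keys (l.map (·.1))).length : Int) - (d.keys.length : Int) := by
  induction l with
  | nil => intro d c; simp [PySem.Set.update_nil]
  | cons p t ih =>
    intro d c
    rw [List.foldl_cons, pvStepA_eq]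
    have hadd : (d.insert p.1 (d.getD p.1 0 + p.2)).keys = PySem.Set.add d.keys p.1 := by
      by_cases hc : d.contains p.1 = true
      · rw [PySem.Dict.keys_insert_of_contains _ _ hc,
          PySem.Set.add_of_mem ((PySem.Dict.contains_iff_mem_keys d p.1).mp hc)]
      · rw [PySem.Dict.keys_insert_of_not_contains _ _ (by simpa using hc),
          PySem.Set.add_of_not_mem (fun hm => hc ((PySem.Dict.contains_iff_mem_keys d p.1).mpr hm))]
    rw [ih]
    rw [List.map_cons, PySem.Set.update_cons, hadd]
    by_cases hc : d.contains p.1 = true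
    · rw [if_pos hc, PySem.Set.add_of_mem ((PySem.Dict.contains_iff_mem_keys d p.1).mp hc)]
      ring
    · rw [if_neg hc, PySem.Set.add_of_not_mem (fun hm => hc ((PySem.Dict.contains_iff_mem_keys d p.1).mpr hm))]
      simp only [List.length_append, List.length_singleton]
      push_cast
      ring

-- getD after a merge fold: old value plus the sum of amounts carried by that key.
theorem pv_getD_merge (l : List (String × Int)) :
    ∀ (d : PySem.Dict String Int) (k : String),
    (pvMerge d l).getD k 0 = d.getD k 0 + ((l.filter (fun p => p.1 == k)).map (·.2)).sum := by
  induction l with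
  | nil => intro d k; simp [pvMerge]
  | cons p t ih =>
    intro d k
    have : pvMerge d (p :: t) = pvMerge (d.insert p.1 (d.getD p.1 0 + p.2)) t := rfl
    rw [this, ih]
    by_cases hk : p.1 = k
    · subst hk
      simp [PySem.Dict.getD_insert_self]
      ring
    · rw [PySem.Dict.getD_insert_of_ne _ _ _ (fun h : k = p.1 => hk h.symm)]
      simp [hk]

-- In a nodup list, filtering for one element yields it once or not at all.
theorem pv_filter_eq (ks : List String) (k : String) (h : ks.Nodup) :
    ks.filter (fun x => x == k) = if k ∈ ks then [k] else [] := by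
  rw [show (fun x => x == k) = (· == k) from rfl, List.filter_beq]
  by_cases hm : k ∈ ks
  · rw [if_pos hm, List.count_eq_one_of_mem h hm, List.replicate_one]
  · rw [if_neg hm, List.count_eq_zero.mpr hm, List.replicate_zero]

theorem pv_update_ofList (s : List String) (xs : List String) :
    PySem.Set.update s (PySem.Set.ofList xs) = PySem.Set.update s xs := by
  rw [PySem.Set.update_eq_append_filter, PySem.Set.update_eq_append_filter, PySem.Set.ofList_ofList]

theorem pv_keys_merge (d : PySem.Dict String Int) (l : List (String × Int)) :
    (pvMerge d l).keys = PySem.Set.update d.keys (l.map (·.1)) := by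
  exact PySem.Dict.keys_foldl_insert_key l (·.1) (fun t p => t.getD p.1 0 + p.2) d

theorem pv_nodup_keys_merge (d : PySem.Dict String Int) (l : List (String × Int)) (h : d.keys.Nodup) :
    (pvMerge d l).keys.Nodup := by
  exact PySem.Dict.nodup_keys_foldl_insert_key l (·.1) (fun t p => t.getD p.1 0 + p.2) d h

-- The two merge strategies (raw increments vs aggregated totals) give the same dict.
theorem pv_merge_agg (d : PySem.Dict String Int) (l : List (String × Int)) (h : d.keys.Nodup) :
    pvMerge d l = pvMerge d (pvMerge PySem.Dict.empty l).items := by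
  have hagg : (pvMerge PySem.Dict.empty l).keys = PySem.Set.ofList (l.map (·.1)) := by
    rw [pv_keys_merge, PySem.Dict.keys_empty, PySem.Set.update_nil_left]
  have haggnd : (pvMerge PySem.Dict.empty l).keys.Nodup :=
    pv_nodup_keys_merge _ _ PySem.Dict.nodup_keys_empty
  have hitems : (pvMerge PySem.Dict.empty l).items.map (·.1) = (pvMerge PySem.Dict.empty l).keys := rfl
  have hkeys : (pvMerge d (pvMerge PySem.Dict.empty l).items).keys = (pvMerge d l).keys := by
    rw [pv_keys_merge, pv_keys_merge, hitems, hagg, pv_update_ofList]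
  have hgetD : ∀ k, (pvMerge d (pvMerge PySem.Dict.empty l).items).getD k 0 = (pvMerge d l).getD k 0 := by
    intro k
    rw [pv_getD_merge, pv_getD_merge]
    congr 1
    rw [PySem.Dict.items_eq_map_keys _ haggnd 0, List.filter_map, hagg]
    have : ((PySem.Set.ofList (l.map (·.1))).filter
        ((fun p : String × Int => p.1 == k) ∘ (fun k' => (k', (pvMerge PySem.Dict.empty l).getD k' 0))))
        = (PySem.Set.ofList (l.map (·.1))).filter (fun x => x == k) := rfl
    rw [this, pv_filter_eq _ _ (PySem.Set.nodup_ofList _)]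
    by_cases hm : k ∈ PySem.Set.ofList (l.map (·.1))
    · rw [if_pos hm]
      simp only [List.map_cons, List.map_nil, List.sum_cons, List.sum_nil, add_zero]
      rw [pv_getD_merge, PySem.Dict.getD_empty, zero_add]
    · rw [if_neg hm]
      have hndk : ∀ p ∈ l.filter (fun p => p.1 == k), False := by
        intro p hp
        have := List.of_mem_filter hp
        have hmem : p.1 ∈ l.map (·.1) := List.mem_map_of_mem (List.mem_of_mem_filter hp)
        apply hm
        rw [PySem.Set.mem_ofList]
        simpa [show p.1 = k from by simpa using this] using hmem
      have : l.filter (fun p => p.1 == k) = [] := by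
        cases hl : l.filter (fun p => p.1 == k) with
        | nil => rfl
        | cons q t => exact absurd (hl ▸ List.mem_cons_self) (fun hq => hndk q hq)
      simp [this]
  apply PySem.Dict.ext
  rw [PySem.Dict.items_eq_map_keys _ (pv_nodup_keys_merge d l h) 0,
      PySem.Dict.items_eq_map_keys _ (by rw [hkeys]; exact pv_nodup_keys_merge d l h) 0, hkeys]
  exact (List.map_congr_left (fun k _ => by rw [hgetD k])).symm

-- B's counted filter = growth of the key set.
theorem pv_added_eq (d : PySem.Dict String Int) (l : List (String × Int)) :
    (((pvMerge PySem.Dict.empty l).keys.filter (fun k => !(d.contains k))).length : Int)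
      = ((PySem.Set.update d.keys (l.map (·.1))).length : Int) - (d.keys.length : Int) := by
  have hagg : (pvMerge PySem.Dict.empty l).keys = PySem.Set.ofList (l.map (·.1)) := by
    rw [pv_keys_merge, PySem.Dict.keys_empty, PySem.Set.update_nil_left]
  have hpred : ∀ k : String, (!(d.contains k)) = (!(PySem.Set.contains d.keys k)) := by
    intro k
    rw [PySem.Dict.contains_eq_decide_mem_keys, PySem.Set.contains_eq_listContains]
    simp
  rw [hagg, List.filter_congr (fun k _ => hpred k),
      PySem.Set.update_eq_append_filter, List.length_append]
  push_cast
  ring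

-- ===== VERDICT (by name: the statement is the Claim_ definition above) =====
theorem increment_with_report_spec : Claim_equal_increment_with_report := by
  intro current increments _
  unfold Spec_increment_with_report increment_with_report increment_with_report_alt
  have hnd : (PySem.Dict.ofList current).keys.Nodup := PySem.Dict.nodup_keys_ofList current
  refine Prod.ext ?_ ?_
  · simp only
    rw [pv_fst_foldl, pv_merge_agg _ _ hnd]
  · simp only
    rw [pv_snd_foldl, pv_added_eq]
    ring
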